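-- pv_equiv track=rewrite | github.com/jiawei-tan/LINDTIE | modules/code_base/annotate/LINDTIE_post_process.py | get_all_genes
-- ===== SOURCE A (Python) =====
-- def get_all_genes(overlapping_genes):
--     if isinstance(overlapping_genes, str):
--         genes = overlapping_genes.split(':')
--         genes = [gene.split('|') for gene in genes]
--         genes = [g for gene in genes for g in gene if g != '']
--         return genes
--     else:
--         return []
-- ===== SOURCE B (Python) =====
-- def get_all_genes(overlapping_genes):
--     if isinstance(overlapping_genes, str):
--         tokens = []
--         cur = []
--         for ch in overlapping_genes:
--             if ch == ':' or ch == '|':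
--                 if cur:
--                     tokens.append(''.join(cur))
--                 cur = []
--             else:
--                 cur.append(ch)
--         if cur:
--             tokens.append(''.join(cur))
--         return tokens
--     else:
--         return []
-- ===== Notes on version B (the rewrite author's own statement) =====
-- stated objective: alternative
-- what changed: Replaces the two-level split pipeline (split on colon, split each piece on pipe, flatten and drop empties) with a single left-to-right pass that accumulates characters and flushes a token at every delimiter, never materialising intermediate piece lists.
import Mathlib
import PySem

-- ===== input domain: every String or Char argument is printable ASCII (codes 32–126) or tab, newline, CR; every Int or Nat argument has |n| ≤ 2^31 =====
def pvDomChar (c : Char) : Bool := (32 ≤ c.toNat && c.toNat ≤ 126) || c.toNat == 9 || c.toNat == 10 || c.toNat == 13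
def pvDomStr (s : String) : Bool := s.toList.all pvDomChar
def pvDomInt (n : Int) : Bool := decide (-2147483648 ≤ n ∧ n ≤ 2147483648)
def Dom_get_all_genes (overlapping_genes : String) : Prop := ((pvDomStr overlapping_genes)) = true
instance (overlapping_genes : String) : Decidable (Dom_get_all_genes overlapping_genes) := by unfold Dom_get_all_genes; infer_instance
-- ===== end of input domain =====

-- B replaces A's nested split/flatten/filter pipeline with one accumulator pass over the characters, flushing a token at each delimiter (alternative decomposition, same cost).


-- ===== PORT A =====
-- genes = overlapping_genes.split(':'); genes = [gene.split('|') for gene in genes];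
-- genes = [g for gene in genes for g in gene if g != '']   (the isinstance branch is always the str case here)
def get_all_genes (overlapping_genes : String) : List String :=
  let genes : List String := (PySem.Chars.splitOn overlapping_genes.toList [':']).map String.ofList
  let genes2 : List (List String) :=
    genes.map (fun gene => (PySem.Chars.splitOn gene.toList ['|']).map String.ofList)
  genes2.flatMap (fun gene => gene.filter (fun g => g ≠ ""))

-- ===== PORT B =====
-- single pass: flush the accumulated characters as a token at each ':' or '|'
def get_all_genes_alt (overlapping_genes : String) : List String :=
  let st := overlapping_genes.toList.foldl
    (fun (st : List String × List Char) ch =>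
      if ch = ':' ∨ ch = '|' then
        ((if st.2 ≠ [] then st.1 ++ [String.ofList st.2] else st.1), [])
      else (st.1, st.2 ++ [ch]))
    ([], [])
  if st.2 ≠ [] then st.1 ++ [String.ofList st.2] else st.1

-- ===== PRECONDITION & SPEC =====
def Spec_get_all_genes (overlapping_genes : String) (out : List String) : Prop := out = get_all_genes_alt overlapping_genes
instance (overlapping_genes : String) (out : List String) : Decidable (Spec_get_all_genes overlapping_genes out) := by unfold Spec_get_all_genes; infer_instance

-- ===== CLAIM (what is proved, stated in full; the proofs are below) =====
def Claim_equal_get_all_genes : Prop := ∀ (overlapping_genes : String), Dom_get_all_genes overlapping_genes → Spec_get_all_genes overlapping_genes (get_all_genes overlapping_genes)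

-- ===== LEMMAS AND PROOFS =====

-- reference single-character splitter
def splitC (d : Char) : List Char → List (List Char)
  | [] => [[]]
  | c :: rest => if c = d then [] :: splitC d rest
                 else (splitC d rest).modifyHead (fun t => c :: t)

-- splitter on either delimiter
def splitB : List Char → List (List Char)
  | [] => [[]]
  | c :: rest => if c = ':' ∨ c = '|' then [] :: splitB rest
                 else (splitB rest).modifyHead (fun t => c :: t)

lemma splitC_ne_nil (d : Char) (l : List Char) : splitC d l ≠ [] := by
  cases l with
  | nil => simp [splitC]
  | cons c rest =>
    simp only [splitC]
    split_ifs <;> simp [List.modifyHead]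
    · cases h : splitC d rest with
      | nil => exact absurd h (splitC_ne_nil d rest)
      | cons t ts => simp

lemma modifyHead_nil_append {α : Type} (l : List (List α)) :
    l.modifyHead (fun t => [] ++ t) = l := by
  cases l <;> simp [List.modifyHead]

lemma modifyHead_append_of_ne_nil {α : Type} (f : List α → List α) (a b : List (List α))
    (h : a ≠ []) : (a ++ b).modifyHead f = a.modifyHead f ++ b := by
  cases a with
  | nil => exact absurd rfl h
  | cons t ts => simp [List.modifyHead]

lemma modifyHead_modifyHead {α : Type} (f g : List α → List α) (l : List (List α)) :
    (l.modifyHead g).modifyHead f = l.modifyHead (fun t => f (g t)) := by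
  cases l <;> simp [List.modifyHead]

lemma splitOn_go_single (d : Char) :
    ∀ (fuel : Nat) (l cur : List Char) (acc : List (List Char)), l.length ≤ fuel →
    PySem.Chars.splitOn.go [d] fuel l cur acc
      = acc.reverse ++ (splitC d l).modifyHead (fun t => cur.reverse ++ t) := by
  intro fuel
  induction fuel with
  | zero =>
    intro l cur acc hl
    have : l = [] := List.length_eq_zero_iff.mp (Nat.le_zero.mp hl)
    subst this
    simp [PySem.Chars.splitOn.go, splitC]
  | succ n ih =>
    intro l cur acc hl
    cases l with
    | nil => simp [PySem.Chars.splitOn.go, splitC]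
    | cons c rest =>
      by_cases hc : c = d
      · subst hc
        have hpre : List.isPrefixOf [c] (c :: rest) = true := by
          simp [List.isPrefixOf]
        rw [PySem.Chars.splitOn.go]
        simp only [hpre, if_true, List.length_cons, List.length_nil, List.drop_succ_cons, List.drop_zero]
        rw [ih rest [] (cur.reverse :: acc) (by simpa using Nat.lt_succ_iff.mp (by simpa using hl))]
        have h5 : splitC c (c :: rest) = [] :: splitC c rest := by simp [splitC]
        rw [h5]
        have h6 : List.modifyHead (fun t => List.reverse ([] : List Char) ++ t) (splitC c rest)
            = splitC c rest := modifyHead_nil_append _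
        rw [h6]
        simp [List.modifyHead]
      · have hpre : List.isPrefixOf [d] (c :: rest) = false := by
          simp [List.isPrefixOf]
          exact fun h => absurd h.symm hc
        rw [PySem.Chars.splitOn.go]
        simp only [hpre, Bool.false_eq_true, if_false]
        rw [ih rest (c :: cur) acc (by simpa using Nat.lt_succ_iff.mp (by simpa using hl))]
        simp only [splitC, if_neg hc, modifyHead_modifyHead]
        have hf : (fun t => (c :: cur).reverse ++ t) = (fun t => cur.reverse ++ c :: t) := by
          funext t; simp
        rw [hf]

lemma splitOn_single (d : Char) (l : List Char) :
    PySem.Chars.splitOn l [d] = splitC d l := by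
  unfold PySem.Chars.splitOn
  rw [splitOn_go_single d (l.length + 1) l [] [] (Nat.le_succ _)]
  simp only [List.reverse_nil, List.nil_append]
  exact modifyHead_nil_append _

-- composing the two single-char splits gives the two-delimiter split
lemma flatMap_splitC : ∀ (l : List Char),
    (splitC ':' l).flatMap (fun p => splitC '|' p) = splitB l := by
  intro l
  induction l with
  | nil => simp [splitC, splitB]
  | cons c rest ih =>
    by_cases h1 : c = ':'
    · subst h1
      have lhs : splitC ':' (':' :: rest) = [] :: splitC ':' rest := by simp [splitC]
      rw [lhs, List.flatMap_cons, ih]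
      simp [splitC, splitB]
    · by_cases h2 : c = '|'
      · subst h2
        cases hs : splitC ':' rest with
        | nil => exact absurd hs (splitC_ne_nil ':' rest)
        | cons t ts =>
          rw [hs] at ih
          have lhs : splitC ':' ('|' :: rest) = ('|' :: t) :: ts := by
            simp [splitC, hs, List.modifyHead]
          have h3 : splitC '|' ('|' :: t) = [] :: splitC '|' t := by simp [splitC]
          have h4 : splitB ('|' :: rest) = [] :: splitB rest := by simp [splitB]
          rw [lhs, List.flatMap_cons, h3, h4, ← ih, List.flatMap_cons]
          simp
      · have hd : ¬ (c = ':' ∨ c = '|') := by tauto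
        cases hs : splitC ':' rest with
        | nil => exact absurd hs (splitC_ne_nil ':' rest)
        | cons t ts =>
          rw [hs] at ih
          have lhs : splitC ':' (c :: rest) = (c :: t) :: ts := by
            simp [splitC, if_neg h1, hs, List.modifyHead]
          rw [lhs, List.flatMap_cons]
          have h3 : splitC '|' (c :: t) = (splitC '|' t).modifyHead (fun u => c :: u) := by
            simp [splitC, if_neg h2]
          rw [h3]
          have h4 : splitB (c :: rest) = (splitB rest).modifyHead (fun u => c :: u) := by
            simp [splitB, if_neg hd]
          rw [h4, ← ih, List.flatMap_cons,
            ← modifyHead_append_of_ne_nil _ _ _ (splitC_ne_nil '|' t)]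

-- the char-level tokenizer loop of B
def stepB (st : List (List Char) × List Char) (ch : Char) : List (List Char) × List Char :=
  if ch = ':' ∨ ch = '|' then ((if st.2 ≠ [] then st.1 ++ [st.2] else st.1), [])
  else (st.1, st.2 ++ [ch])

lemma foldl_stepB : ∀ (l : List Char) (toks : List (List Char)) (cur : List Char),
    (let st := l.foldl stepB (toks, cur);
     if st.2 ≠ [] then st.1 ++ [st.2] else st.1)
      = toks ++ ((splitB l).modifyHead (fun t => cur ++ t)).filter (fun t => t ≠ []) := by
  intro l
  induction l with
  | nil =>
    intro toks cur
    simp only [List.foldl_nil, splitB, List.modifyHead, List.filter]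
    by_cases h : cur = [] <;> simp [h]
  | cons c rest ih =>
    intro toks cur
    by_cases hd : c = ':' ∨ c = '|'
    · simp only [List.foldl_cons, stepB, if_pos hd]
      rw [ih]
      have h5 : (splitB rest).modifyHead (fun t => [] ++ t) = splitB rest :=
        modifyHead_nil_append _
      have h6 : (splitB (c :: rest)).modifyHead (fun t => cur ++ t)
          = (cur :: splitB rest) := by
        simp [splitB, if_pos hd, List.modifyHead]
      rw [h6, h5, List.filter_cons]
      by_cases h : cur = [] <;> simp [h]
    · simp only [List.foldl_cons, stepB, if_neg hd]
      rw [ih]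
      simp only [splitB, if_neg hd, modifyHead_modifyHead]
      have hf : (fun t => cur ++ [c] ++ t) = (fun t => cur ++ c :: t) := by
        funext t; simp
      rw [hf]
  
lemma ofList_eq_empty_iff (l : List Char) : (String.ofList l = "") ↔ l = [] := by
  constructor
  · intro h
    have := congrArg String.toList h
    simpa using this
  · intro h; subst h; rfl

lemma filter_map_ofList (l : List (List Char)) :
    (l.map String.ofList).filter (fun g => g ≠ "") = (l.filter (fun t => t ≠ [])).map String.ofList := by
  induction l with
  | nil => rfl
  | cons t ts ih =>
    by_cases h : t = []
    · subst h
      simp only [List.map_cons, List.filter_cons]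
      simpa using ih
    · have h1 : ¬ (String.ofList t = "") := fun hh => h ((ofList_eq_empty_iff t).mp hh)
      simp only [List.map_cons, List.filter_cons]
      simp [h, h1]
      simpa using ih

-- B's fold tracks the char-level tokenizer via map String.ofList
lemma foldl_alt_eq (l : List Char) (toks : List (List Char)) (cur : List Char) :
    l.foldl (fun (st : List String × List Char) ch =>
      if ch = ':' ∨ ch = '|' then
        ((if st.2 ≠ [] then st.1 ++ [String.ofList st.2] else st.1), [])
      else (st.1, st.2 ++ [ch])) (toks.map String.ofList, cur)
    = ((l.foldl stepB (toks, cur)).1.map String.ofList, (l.foldl stepB (toks, cur)).2) := by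
  induction l generalizing toks cur with
  | nil => rfl
  | cons c rest ih =>
    simp only [List.foldl_cons, stepB]
    by_cases hd : c = ':' ∨ c = '|'
    · simp only [if_pos hd]
      by_cases h : cur = []
      · subst h; simpa using ih toks []
      · simp only [if_pos (by simpa using h : cur ≠ [])]
        have := ih (toks ++ [cur]) []
        simpa using this
    · simp only [if_neg hd]
      exact ih toks (cur ++ [c])

-- ===== VERDICT (by name: the statement is the Claim_ definition above) =====
theorem get_all_genes_spec : Claim_equal_get_all_genes := by
  intro s _
  unfold Spec_get_all_genes get_all_genes get_all_genes_alt
  simp only [splitOn_single]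
  have hA : (splitC ':' s.toList).flatMap
      (fun a => ((splitC '|' (String.ofList a).toList).map String.ofList).filter (fun g => g ≠ ""))
      = (((splitC ':' s.toList).flatMap (fun p => splitC '|' p)).filter (fun t => t ≠ [])).map String.ofList := by
    rw [List.filter_flatMap, List.map_flatMap]
    apply List.flatMap_congr  -- pointwise over the pieces
    intro p _
    have hp : (String.ofList p).toList = p := by simp
    rw [hp, filter_map_ofList]
  simp only [List.flatMap_map]
  rw [hA, flatMap_splitC]
  have := foldl_alt_eq s.toList [] []
  simp only [List.map_nil] at this
  rw [this]
  have h2 := foldl_stepB s.toList [] []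
  simp only [List.nil_append] at h2
  have hid : List.modifyHead (fun t : List Char => t) (splitB s.toList) = splitB s.toList := by
    cases splitB s.toList <;> rfl
  rw [hid] at h2
  rw [← h2]
  by_cases h : (s.toList.foldl stepB ([], [])).2 = [] <;> simp [h]
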